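-- pv_equiv track=rewrite | github.com/DevP3try/enigma_machine | Enigma-BR-52/txt_format.py | format_plug
-- ===== SOURCE A (Python) =====
-- ALFABETO_BR_52 = "ABCDEFGHIJKLMNOPQRSTUVWXYZ0123456789ÁÀÂÃÇÉÊÍÓÔÕÚ .,?°:"
--
-- def format_plug(plug_str: str) -> str:
--     """ Transforma a configuração do plugboard em uma string formatada e valida duplicidade e pares inválidos.
--     Cada par deve consistir de duas letras distintas do alfabeto, sem repetições. """
--     plugs = plug_str.upper().split()
--     plug_dict = {}
--     todas_letras = set()
--     for par in plugs:
--         if len(par) != 2 or not all(c in ALFABETO_BR_52 for c in par):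
--             raise ValueError("ERRO: Cada par de plugboard deve ter exatamente 2 letras distintas.")
--         a, b = par[0], par[1]
--         if a == b:
--             raise ValueError("ERRO: Pares de plugboard devem ser letras distintas.")
--         if a in todas_letras or b in todas_letras:
--             raise ValueError("ERRO: Letras duplicadas no plugboard não são permitidas.")
--         plug_dict[a] = b
--         plug_dict[b] = a
--         todas_letras.update([a, b])
--     # Retorna uma string formatada com os pares
--     return " ".join(sorted([f"{a}{b}" for a, b in plug_dict.items() if a < b]))
-- ===== SOURCE B (Python) =====
-- ALFABETO_BR_52 = "ABCDEFGHIJKLMNOPQRSTUVWXYZ0123456789ÁÀÂÃÇÉÊÍÓÔÕÚ .,?°:"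
--
-- def format_plug(plug_str: str) -> str:
--     """Validate the plugboard pairs with three whole-list checks, then
--     normalize each pair eagerly (smaller letter first) — no bidirectional dict."""
--     plugs = plug_str.upper().split()
--     if any(len(par) != 2 or any(c not in ALFABETO_BR_52 for c in par) for par in plugs):
--         raise ValueError("ERRO: Cada par de plugboard deve ter exatamente 2 letras distintas.")
--     if any(par[0] == par[1] for par in plugs):
--         raise ValueError("ERRO: Pares de plugboard devem ser letras distintas.")
--     letters = "".join(plugs)
--     if len(set(letters)) != len(letters):
--         raise ValueError("ERRO: Letras duplicadas no plugboard não são permitidas.")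
--     return " ".join(sorted(par if par[0] < par[1] else par[1] + par[0] for par in plugs))
-- ===== Notes on version B (the rewrite author's own statement) =====
-- stated objective: simpler
-- what changed: B drops A's bidirectional plug_dict and incremental seen-set: it validates with three whole-list checks (token shape, equal letters, any duplicate letter via one set-size comparison) and normalizes each pair eagerly (smaller letter first), instead of storing both directions in a dict and filtering dict.items() with a<b.
import Mathlib
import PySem

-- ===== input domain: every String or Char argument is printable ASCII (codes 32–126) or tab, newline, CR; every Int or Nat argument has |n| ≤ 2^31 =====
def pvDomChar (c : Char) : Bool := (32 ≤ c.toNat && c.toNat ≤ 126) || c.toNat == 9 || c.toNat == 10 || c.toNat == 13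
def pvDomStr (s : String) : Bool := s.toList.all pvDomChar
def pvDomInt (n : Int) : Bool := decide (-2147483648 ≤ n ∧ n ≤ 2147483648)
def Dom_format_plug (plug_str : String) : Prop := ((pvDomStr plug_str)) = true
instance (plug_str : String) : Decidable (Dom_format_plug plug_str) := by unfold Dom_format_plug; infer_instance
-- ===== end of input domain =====

-- B replaces A's bidirectional dict + incremental duplicate set by three whole-list validity
-- checks followed by eager per-pair normalization (simpler decomposition, same results).

-- ===== PORT A =====
def pvAlphabet : List Char := "ABCDEFGHIJKLMNOPQRSTUVWXYZ0123456789ÁÀÂÃÇÉÊÍÓÔÕÚ .,?°:".toList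

-- the for-loop of A; `none` = one of the three ValueErrors
def formatPlugLoop : List (List Char) → PySem.Dict Char Char → PySem.Set Char → Option (PySem.Dict Char Char)
  | [], d, _ => some d
  | par :: rest, d, seen =>
    if par.length ≠ 2 ∨ ¬ (∀ c ∈ par, c ∈ pvAlphabet) then none
    else
      match par with
      | [a, b] =>
        if a = b then none
        else if seen.contains a || seen.contains b then none
        else formatPlugLoop rest ((d.insert a b).insert b a) ((seen.add a).add b)
      | _ => none

def format_plug (plug_str : String) : String :=
  let plugs := PySem.Chars.split₀ (PySem.Chars.upper plug_str.toList)
  match formatPlugLoop plugs PySem.Dict.empty PySem.Set.empty with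
  | none => ""  -- ValueError (excluded by Pre_)
  | some d =>
      String.ofList (PySem.Chars.join [' ']
        (PySem.List.sorted ((d.items.filter (fun p => decide (p.1 < p.2))).map (fun p => [p.1, p.2])) id))

-- ===== PORT B =====
def format_plug_alt (plug_str : String) : String :=
  let plugs := PySem.Chars.split₀ (PySem.Chars.upper plug_str.toList)
  if plugs.any (fun par => decide (par.length ≠ 2) || par.any (fun c => !(pvAlphabet.contains c))) then ""  -- ValueError
  else if plugs.any (fun par => match par with | a :: b :: _ => a == b | _ => false) then ""  -- ValueError
  else
    let letters := plugs.flatten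
    if (PySem.Set.ofList letters).length ≠ letters.length then ""  -- ValueError
    else
      String.ofList (PySem.Chars.join [' ']
        (PySem.List.sorted (plugs.map (fun par =>
          match par with
          | a :: b :: _ => if a < b then [a, b] else [b, a]
          | _ => par)) id))

-- ===== PRECONDITION & SPEC =====
-- Pre_ excludes exactly the inputs on which A raises one of its three ValueErrors:
-- a token that is not two alphabet letters, or any repeated letter.
def Pre_format_plug (plug_str : String) : Prop :=
  let plugs := PySem.Chars.split₀ (PySem.Chars.upper plug_str.toList)
  (∀ p ∈ plugs, p.length = 2 ∧ p.all (fun c => pvAlphabet.contains c) = true) ∧ plugs.flatten.Nodup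
instance (plug_str : String) : Decidable (Pre_format_plug plug_str) := by unfold Pre_format_plug; infer_instance

def pvWitness_format_plug : String := "ba DC"

def Spec_format_plug (plug_str : String) (out : String) : Prop := out = format_plug_alt plug_str
instance (plug_str : String) (out : String) : Decidable (Spec_format_plug plug_str out) := by unfold Spec_format_plug; infer_instance

-- ===== CLAIM (what is proved, stated in full; the proofs are below) =====
def Claim_equal_format_plug : Prop := ∀ (plug_str : String), Dom_format_plug plug_str → Pre_format_plug plug_str → Spec_format_plug plug_str (format_plug plug_str)

-- ===== LEMMAS AND PROOFS =====

-- the two directed entries A stores per pair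
def pvExpand : List Char → List (Char × Char)
  | [a, b] => [(a, b), (b, a)]
  | _ => []

lemma formatPlugLoop_spec (plugs : List (List Char)) :
    ∀ (d : PySem.Dict Char Char) (seen : List Char),
    (∀ p ∈ plugs, p.length = 2 ∧ ∀ c ∈ p, c ∈ pvAlphabet) →
    (seen ++ plugs.flatten).Nodup →
    (∀ kv ∈ d.items, kv.1 ∈ seen) →
    ∃ d', formatPlugLoop plugs d seen = some d' ∧
          d'.items = d.items ++ plugs.flatMap pvExpand := by
  induction plugs with
  | nil => intro d seen _ _ _; exact ⟨d, rfl, by simp⟩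
  | cons par rest ih =>
    intro d seen hval hnd hkeys
    obtain ⟨hlen, halpha⟩ := hval par (by simp)
    obtain ⟨a, b, rfl⟩ := List.length_eq_two.mp hlen
    simp only [List.flatten_cons] at hnd
    have hnd' : (seen ++ [a] ++ [b] ++ rest.flatten).Nodup := by
      simpa [List.append_assoc] using hnd
    simp only [List.nodup_append, List.nodup_cons, List.mem_append, List.mem_cons,
      List.not_mem_nil, or_false, List.nodup_nil, and_true] at hnd
    obtain ⟨hseenN, ⟨⟨hab, -⟩, hflatN, hdisjAB⟩, hdisjSeen⟩ := hnd
    have haS : a ∉ seen := fun h => hdisjSeen a h a (Or.inl (Or.inl rfl)) rfl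
    have hbS : b ∉ seen := fun h => hdisjSeen b h b (Or.inl (Or.inr rfl)) rfl
    have haF : a ∉ rest.flatten := fun h => hdisjAB a (Or.inl rfl) a h rfl
    have hbF : b ∉ rest.flatten := fun h => hdisjAB b (Or.inr rfl) b h rfl
    have hguard : ¬([a, b].length ≠ 2 ∨ ¬∀ c ∈ [a, b], c ∈ pvAlphabet) :=
      fun h => h.elim (fun h2 => h2 rfl) (fun h2 => h2 halpha)
    have hda : d.contains a = false := by
      simp only [PySem.Dict.contains, List.any_eq_false]
      intro kv hkv
      simp only [beq_iff_eq]
      exact fun h => haS (h ▸ hkeys kv hkv)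
    have hitems1 : (d.insert a b).items = d.items ++ [(a, b)] := by
      simp [PySem.Dict.insert, hda]
    have hdb : (d.insert a b).contains b = false := by
      simp only [PySem.Dict.contains, List.any_eq_false, hitems1]
      intro kv hkv
      simp only [beq_iff_eq]
      rcases List.mem_append.mp hkv with h | h
      · exact fun he => hbS (he ▸ hkeys kv h)
      · simp only [List.mem_singleton] at h; subst h; exact fun he => hab he
    have hitems2 : ((d.insert a b).insert b a).items = d.items ++ [(a, b), (b, a)] := by
      conv_lhs => rw [PySem.Dict.insert]
      rw [if_neg (by rw [hdb]; simp)]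
      simp [hitems1]
    have hadd : (PySem.Set.add seen a).add b = seen ++ [a] ++ [b] := by
      have h1 : PySem.Set.add seen a = seen ++ [a] := by
        simp [PySem.Set.add, PySem.Set.contains, haS]
      rw [h1]
      simp [PySem.Set.add, PySem.Set.contains, hbS, Ne.symm hab]
    have hstep : formatPlugLoop ([a, b] :: rest) d seen =
        formatPlugLoop rest ((d.insert a b).insert b a) ((PySem.Set.add seen a).add b) := by
      simp only [formatPlugLoop]
      rw [if_neg hguard]
      simp [hab, haS, hbS]
    rw [hstep, hadd]
    have hkeys' : ∀ kv ∈ ((d.insert a b).insert b a).items, kv.1 ∈ seen ++ [a] ++ [b] := by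
      rw [hitems2]
      intro kv hkv
      rcases List.mem_append.mp hkv with h | h
      · simp [hkeys kv h]
      · simp only [List.mem_cons, List.not_mem_nil, or_false] at h
        rcases h with h | h <;> subst h <;> simp
    have hval' : ∀ p ∈ rest, p.length = 2 ∧ ∀ c ∈ p, c ∈ pvAlphabet := fun p hp => hval p (by simp [hp])
    have hnd2 : ((seen ++ [a] ++ [b]) ++ rest.flatten).Nodup := by
      simpa [List.append_assoc] using hnd'
    obtain ⟨d', heq, hitems⟩ := ih ((d.insert a b).insert b a) (seen ++ [a] ++ [b]) hval' hnd2 hkeys'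
    exact ⟨d', heq, by rw [hitems, hitems2]; simp [pvExpand]⟩

lemma pvExpand_filter : ∀ (plugs : List (List Char)),
    (∀ p ∈ plugs, p.length = 2) → plugs.flatten.Nodup →
    ((plugs.flatMap pvExpand).filter (fun p => decide (p.1 < p.2))).map (fun p => [p.1, p.2])
      = plugs.map (fun par => match par with
          | a :: b :: _ => if a < b then [a, b] else [b, a]
          | _ => par) := by
  intro plugs
  induction plugs with
  | nil => intro _ _; simp
  | cons par rest ih =>
    intro hval hnd
    obtain ⟨a, b, rfl⟩ := List.length_eq_two.mp (hval par (by simp))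
    have hnd' : (a :: b :: rest.flatten).Nodup := by simpa using hnd
    have hab : a ≠ b := by intro h; subst h; simp at hnd'
    have hndr : rest.flatten.Nodup := (hnd'.of_cons).of_cons
    simp only [List.flatMap_cons, List.filter_append, List.map_append, List.map_cons]
    rw [ih (fun p hp => hval p (by simp [hp])) hndr]
    rcases lt_or_gt_of_ne hab with h | h
    · simp [pvExpand, List.filter, h, lt_asymm h]
    · simp [pvExpand, List.filter, h, lt_asymm h]

lemma pvSet_foldl_add (l : List Char) :
    ∀ s : List Char, (s ++ l).Nodup → List.foldl PySem.Set.add s l = s ++ l := by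
  induction l with
  | nil => intro s _; simp
  | cons x xs ih =>
    intro s h
    have hx : x ∉ s := by
      simp only [List.nodup_append, List.nodup_cons] at h
      exact fun hm => h.2.2 x hm x (by simp) rfl
    have hadd : PySem.Set.add s x = s ++ [x] := by
      simp [PySem.Set.add, PySem.Set.contains, hx]
    have h' : ((s ++ [x]) ++ xs).Nodup := by simpa [List.append_assoc] using h
    calc List.foldl PySem.Set.add s (x :: xs)
        = List.foldl PySem.Set.add (s ++ [x]) xs := by simp [hadd]
      _ = (s ++ [x]) ++ xs := ih (s ++ [x]) h'
      _ = s ++ x :: xs := by simp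

theorem format_plug_spec : Claim_equal_format_plug := by
  unfold Claim_equal_format_plug
  intro s _ hpre
  obtain ⟨hval0, hnd⟩ := hpre
  have hval : ∀ p ∈ PySem.Chars.split₀ (PySem.Chars.upper s.toList), p.length = 2 ∧ ∀ c ∈ p, c ∈ pvAlphabet :=
    fun p hp => ⟨(hval0 p hp).1, by simpa using (hval0 p hp).2⟩
  unfold Spec_format_plug format_plug format_plug_alt
  simp only []
  set plugs := PySem.Chars.split₀ (PySem.Chars.upper s.toList) with hp
  -- A side: the loop succeeds and the dict holds both directions of every pair, in order
  obtain ⟨d, heq, hitems⟩ := formatPlugLoop_spec plugs PySem.Dict.empty PySem.Set.empty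
    hval (by simpa using hnd) (by simp [PySem.Dict.empty])
  rw [heq]
  simp only [PySem.Dict.empty, List.nil_append] at hitems
  -- B side: the three validity checks all pass
  have hg1 : (plugs.any fun par => decide (par.length ≠ 2) || par.any fun c => !(pvAlphabet.contains c)) = false := by
    rw [List.any_eq_false]
    intro par hpar
    obtain ⟨hlen, halpha⟩ := hval par hpar
    simp [hlen]
    exact halpha
  have hg2 : (plugs.any fun par => match par with | a :: b :: _ => a == b | _ => false) = false := by
    rw [List.any_eq_false]
    intro par hpar
    obtain ⟨a, b, rfl⟩ := List.length_eq_two.mp (hval par hpar).1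
    have : [a, b].Nodup := (List.nodup_flatten.mp hnd).1 [a, b] hpar
    simp only [List.nodup_cons, List.mem_singleton] at this
    simp [this.1]
  have hg3 : ¬((PySem.Set.ofList plugs.flatten).length ≠ plugs.flatten.length) := by
    rw [show PySem.Set.ofList plugs.flatten = List.foldl PySem.Set.add [] plugs.flatten from rfl,
        pvSet_foldl_add plugs.flatten [] (by simpa using hnd)]
    simp
  rw [hg1, hg2]
  simp only [Bool.false_eq_true, if_false, if_neg hg3]
  rw [hitems, pvExpand_filter plugs (fun p hp => (hval p hp).1) hnd]
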